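-- pv_equiv track=rewrite | github.com/hRun/TA_cryptosuite | bin/cipher.py | rot47_encrypt
-- ===== SOURCE A (Python) =====
-- def rot47_encrypt(fieldname, field, key):
--     try:
--         key = int(key)
--     except ValueError:
--         raise ValueError('Value for "key" must be an integer for ROT operations!')
--
--     try:
--         cipher = []
--         for i in range(len(field)):
--             unicode_repr = ord(field[i])
--             if unicode_repr >= 33 and unicode_repr <= 126:
--                 cipher.append(chr(33 + ((unicode_repr + key - 33) % 94)))
--             else: # Skip characters outside the ASCII range
--                 cipher.append(field[i])
--         return ''.join(cipher)
--     except: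
--         return field
-- ===== SOURCE B (Python) =====
-- def rot47_encrypt(fieldname, field, key):
--     try:
--         key = int(key)
--     except ValueError:
--         raise ValueError('Value for "key" must be an integer for ROT operations!')
--
--     try:
--         printable = ''.join(map(chr, range(33, 127)))
--         shift = key % 94
--         rotated = printable[shift:] + printable[:shift]
--         return field.translate(str.maketrans(printable, rotated))
--     except:
--         return field
-- ===== Notes on version B (the rewrite author's own statement) =====
-- stated objective: idiomatic
-- what changed: B does no per-character arithmetic at all: it reduces the key to a shift mod 94, builds the rotated alphabet by slicing and concatenating the printable-ASCII string, and maps the whole field in one str.translate call over the maketrans alignment of the two strings.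
import Mathlib
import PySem

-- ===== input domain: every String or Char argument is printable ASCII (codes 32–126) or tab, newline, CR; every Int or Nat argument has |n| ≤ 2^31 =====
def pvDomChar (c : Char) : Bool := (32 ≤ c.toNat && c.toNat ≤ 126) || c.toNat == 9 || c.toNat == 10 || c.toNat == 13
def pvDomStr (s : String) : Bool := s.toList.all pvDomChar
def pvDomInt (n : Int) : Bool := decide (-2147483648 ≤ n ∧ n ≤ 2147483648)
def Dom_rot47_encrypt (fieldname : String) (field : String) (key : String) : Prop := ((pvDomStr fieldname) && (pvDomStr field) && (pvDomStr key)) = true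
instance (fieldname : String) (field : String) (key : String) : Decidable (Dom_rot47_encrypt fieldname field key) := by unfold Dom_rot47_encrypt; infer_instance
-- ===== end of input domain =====

-- B replaces A's per-character ord/branch/mod arithmetic by: reduce the key to shift = key % 94,
-- build the rotated alphabet by slicing+concatenating the printable string, translate via maketrans.


-- ===== PORT A =====
-- 'for i in range(len(field))' reading field[i] is ported as a foldl over field's characters,
-- appending one character per step exactly as A's cipher list grows; ''.join → String.ofList.
-- A's bare 'except: return field' can never fire for a str field, so it has no Lean branch.
def rot47_encrypt (fieldname : String) (field : String) (key : String) : String :=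
  match PySem.Int.ofStr? key with
  | none => ""   -- Python raises ValueError here; outside Pre_
  | some k =>
    String.ofList (field.toList.foldl (fun cipher c =>
      let u : Int := (c.toNat : Int)
      if 33 ≤ u ∧ u ≤ 126 then
        cipher ++ [Char.ofNat (33 + PySem.Int.mod (u + k - 33) 94).toNat]
      else
        cipher ++ [c]) [])

-- ===== PORT B =====
-- B: printable = chr(33)..chr(126); rotated = printable[shift:] + printable[:shift] with
-- shift = key % 94 (slices ported as drop/take: shift is always in 0..93);
-- str.maketrans pairs the two strings positionally (zip → dict) and str.translate maps each
-- character through the table, keeping characters that are not keys.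
def rot47_encrypt_alt (fieldname : String) (field : String) (key : String) : String :=
  match PySem.Int.ofStr? key with
  | none => ""   -- Python raises ValueError here; outside Pre_
  | some k =>
    let printable : List Char := (PySem.List.pyRange 33 127 1).map (fun n => Char.ofNat n.toNat)
    let shift : Nat := (PySem.Int.mod k 94).toNat
    let rotated : List Char := printable.drop shift ++ printable.take shift
    let table : PySem.Dict Char Char :=
      (printable.zip rotated).foldl (fun d p => d.insert p.1 p.2) PySem.Dict.empty
    String.ofList (field.toList.map (fun ch => table.getD ch ch))

-- ===== PRECONDITION & SPEC =====
-- Pre_ excludes exactly the keys on which int(key) raises ValueError (A re-raises it).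
def Pre_rot47_encrypt (fieldname : String) (field : String) (key : String) : Prop :=
  (PySem.Int.ofStr? key).isSome = true
instance (fieldname : String) (field : String) (key : String) : Decidable (Pre_rot47_encrypt fieldname field key) := by unfold Pre_rot47_encrypt; infer_instance

def pvWitness_rot47_encrypt : String × String × String := ("name", "Hello, World!", "5")

def Spec_rot47_encrypt (fieldname : String) (field : String) (key : String) (out : String) : Prop := out = rot47_encrypt_alt fieldname field key
instance (fieldname : String) (field : String) (key : String) (out : String) : Decidable (Spec_rot47_encrypt fieldname field key out) := by unfold Spec_rot47_encrypt; infer_instance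

-- ===== CLAIM (what is proved, stated in full; the proofs are below) =====
def Claim_equal_rot47_encrypt : Prop := ∀ (fieldname : String) (field : String) (key : String), Dom_rot47_encrypt fieldname field key → Pre_rot47_encrypt fieldname field key → Spec_rot47_encrypt fieldname field key (rot47_encrypt fieldname field key)

-- ===== LEMMAS AND PROOFS =====

lemma charOfNat_toNat {n : Nat} (h : n < 55296) : (Char.ofNat n).toNat = n := by
  simp [Char.ofNat, Char.ofNatAux, Nat.isValidChar, h, Char.toNat]

-- the printable alphabet as a range-indexed map
lemma printable_eq :
    (PySem.List.pyRange 33 127 1).map (fun n => Char.ofNat n.toNat)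
      = (List.range 94).map (fun i => Char.ofNat (33 + i)) := by
  rw [PySem.List.pyRange_one, show ((127:Int) - 33).toNat = 94 from rfl, List.map_map]
  apply List.map_congr_left
  intro i _
  simp only [Function.comp_apply]
  congr 1

-- zipping the alphabet with its rotation pairs chr(33+i) with chr(33+(i+s)%94)
lemma zip_rotated (s : Nat) (hs : s < 94) :
    (((List.range 94).map (fun i => Char.ofNat (33 + i))).zip
      (((List.range 94).map (fun i => Char.ofNat (33 + i))).drop s
        ++ ((List.range 94).map (fun i => Char.ofNat (33 + i))).take s))
    = (List.range 94).map (fun i => (Char.ofNat (33 + i), Char.ofNat (33 + (i + s) % 94))) := by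
  apply List.ext_getElem
  · simp; omega
  · intro i h1 h2
    have hi : i < 94 := by simpa using h2
    have hlen : (((List.range 94).map (fun i => Char.ofNat (33 + i))).drop s).length = 94 - s := by
      simp
    rw [List.getElem_zip, List.getElem_map, List.getElem_range]
    by_cases hcase : i < 94 - s
    · rw [List.getElem_append_left (by rw [hlen]; omega), List.getElem_drop, List.getElem_map,
        List.getElem_range, show 33 + (s + i) = 33 + (i + s) % 94 from by omega,
        List.getElem_map, List.getElem_range]
    · rw [List.getElem_append_right (by rw [hlen]; omega)]
      simp only [hlen]
      rw [List.getElem_take, List.getElem_map, List.getElem_range,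
        show 33 + (i - (94 - s)) = 33 + (i + s) % 94 from by omega,
        List.getElem_map, List.getElem_range]

-- lookup in a dict built by inserting (chr(33+i), F i) for i in range m
lemma getD_foldl_insert_range (F : Nat → Char) (m : Nat) (hm : 33 + m ≤ 55296)
    (d : PySem.Dict Char Char) (c : Char) :
    (((List.range m).map (fun i => (Char.ofNat (33 + i), F i))).foldl
        (fun d p => d.insert p.1 p.2) d).getD c c
    = if 33 ≤ c.toNat ∧ c.toNat < 33 + m then F (c.toNat - 33) else d.getD c c := by
  induction m generalizing d with
  | zero =>
    simp only [List.range_zero, List.map_nil, List.foldl_nil]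
    rw [if_neg (by omega)]
  | succ m ih =>
    rw [List.range_succ, List.map_append, List.foldl_append]
    simp only [List.map_cons, List.map_nil, List.foldl_cons, List.foldl_nil]
    rw [PySem.Dict.getD_insert]
    by_cases hc : c = Char.ofNat (33 + m)
    · rw [if_pos hc]
      have htn : c.toNat = 33 + m := by rw [hc, charOfNat_toNat (by omega)]
      rw [if_pos (by omega), htn]
      congr 1
      omega
    · rw [if_neg hc, ih (by omega) d]
      have hne : c.toNat ≠ 33 + m := by
        intro h
        apply hc
        rw [← h, Char.ofNat_toNat]
      by_cases hin : 33 ≤ c.toNat ∧ c.toNat < 33 + m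
      · rw [if_pos hin, if_pos (by omega)]
      · rw [if_neg hin, if_neg (by omega)]

-- ===== VERDICT (by name: the statement is the Claim_ definition above) =====
theorem rot47_encrypt_spec : Claim_equal_rot47_encrypt := by
  intro fieldname field key _hdom hpre
  unfold Spec_rot47_encrypt rot47_encrypt rot47_encrypt_alt
  obtain ⟨k, hk⟩ := Option.isSome_iff_exists.mp hpre
  rw [hk]
  simp only [printable_eq]
  congr 1
  -- A's append-loop is a map
  have hfold :
      field.toList.foldl (fun cipher c =>
        let u : Int := (c.toNat : Int)
        if 33 ≤ u ∧ u ≤ 126 then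
          cipher ++ [Char.ofNat (33 + PySem.Int.mod (u + k - 33) 94).toNat]
        else cipher ++ [c]) []
      = field.toList.map (fun c =>
          if 33 ≤ (c.toNat : Int) ∧ (c.toNat : Int) ≤ 126 then
            Char.ofNat (33 + PySem.Int.mod ((c.toNat : Int) + k - 33) 94).toNat
          else c) := by
    rw [show (fun (cipher : List Char) (c : Char) =>
        let u : Int := (c.toNat : Int)
        if 33 ≤ u ∧ u ≤ 126 then
          cipher ++ [Char.ofNat (33 + PySem.Int.mod (u + k - 33) 94).toNat]
        else cipher ++ [c])
      = (fun cipher c => cipher ++ [if 33 ≤ (c.toNat : Int) ∧ (c.toNat : Int) ≤ 126 then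
          Char.ofNat (33 + PySem.Int.mod ((c.toNat : Int) + k - 33) 94).toNat else c]) from by
        funext cipher c; dsimp only []; split_ifs <;> rfl]
    rw [PySem.List.foldl_append_singleton_eq_map]
    simp
  rw [hfold]
  apply List.map_congr_left
  intro c _
  have hmodk : PySem.Int.mod k 94 = k % 94 := PySem.Int.mod_eq_emod_of_pos (by norm_num)
  have hs : (PySem.Int.mod k 94).toNat < 94 := by omega
  rw [zip_rotated _ hs, getD_foldl_insert_range _ 94 (by norm_num)]
  by_cases h : 33 ≤ (c.toNat : Int) ∧ (c.toNat : Int) ≤ 126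
  · rw [if_pos h, if_pos (by omega)]
    congr 1
    have hmodc : PySem.Int.mod ((c.toNat : Int) + k - 33) 94 = ((c.toNat : Int) + k - 33) % 94 :=
      PySem.Int.mod_eq_emod_of_pos (by norm_num)
    omega
  · rw [if_neg h, if_neg (by omega), PySem.Dict.getD_empty]
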